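-- pv_equiv track=rewrite | github.com/duvallj/Matricks | matrix_utils.py | add_right
-- ===== SOURCE A (Python) =====
-- def add_right(matrix1, matrix2):
--     temp=[]
--     l1=len(matrix1)
--     l2=len(matrix2)
--     for row in range(min(l1,l2)):
--         temp.append(matrix1[row]+matrix2[row])
--     for row in range(l2-l1):
--         temp.append([0]*len(matrix1[0])+matrix2[l1+row])
--     for row in range(l1-l2):
--         temp.append(matrix1[l2+row]+[0]*len(matrix2[0]))
--     return pad(temp)
--
-- def pad(matrix):
--     row_len = max(map(len,matrix))
--     out = []
--     for row in matrix:
--         outrow = []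
--         for col in row:
--             outrow.append(col)
--         outrow.extend([0]*(row_len-len(row)))
--         out.append(outrow)
--     return out
-- ===== SOURCE B (Python) =====
-- def add_right(matrix1, matrix2):
--     l1, l2 = len(matrix1), len(matrix2)
--     n = l1 if l1 > l2 else l2
--     lw = [len(matrix1[i]) if i < l1 else len(matrix1[0]) for i in range(n)]
--     rw = [len(matrix2[i]) if i < l2 else len(matrix2[0]) for i in range(n)]
--     width = max(lw[i] + rw[i] for i in range(n))
--
--     def cell(i, j):
--         if j < lw[i]:
--             return matrix1[i][j] if i < l1 else 0
--         if j < lw[i] + rw[i]: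
--             return matrix2[i][j - lw[i]] if i < l2 else 0
--         return 0
--
--     return [[cell(i, j) for j in range(width)] for i in range(n)]
-- ===== Notes on version B (the rewrite author's own statement) =====
-- stated objective: alternative
-- what changed: B never concatenates or pads row lists: it precomputes per-row half-widths and the target width, then fills each output cell directly by index arithmetic (a j-based case split into the matrix1 part, the matrix2 part, or zero), replacing A's three append loops plus a separate pad pass over assembled rows.
import Mathlib
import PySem

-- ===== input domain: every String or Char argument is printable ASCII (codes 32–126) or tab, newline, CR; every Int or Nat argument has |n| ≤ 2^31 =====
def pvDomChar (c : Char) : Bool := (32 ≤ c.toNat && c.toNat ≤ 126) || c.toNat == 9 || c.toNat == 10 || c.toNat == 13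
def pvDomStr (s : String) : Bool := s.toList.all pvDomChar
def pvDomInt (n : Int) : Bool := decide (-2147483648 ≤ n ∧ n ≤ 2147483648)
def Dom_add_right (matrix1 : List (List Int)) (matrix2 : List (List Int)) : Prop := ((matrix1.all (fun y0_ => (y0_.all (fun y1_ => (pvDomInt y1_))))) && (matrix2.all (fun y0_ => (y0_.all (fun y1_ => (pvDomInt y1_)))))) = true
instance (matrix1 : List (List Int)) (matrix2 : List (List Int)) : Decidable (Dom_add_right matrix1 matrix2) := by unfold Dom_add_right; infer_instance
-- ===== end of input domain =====

-- B computes every output cell directly by index arithmetic (case split on j into the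
-- matrix1 part, the matrix2 part, or zero) instead of concatenating and padding row lists
-- (objective: alternative).


-- ===== PORT A =====
-- pad: max(map(len, matrix)) — max of an empty list raises in Python; Pre_ excludes that,
-- so the `.getD 0` default is never reached on admitted inputs.
def pad (matrix : List (List Int)) : List (List Int) :=
  let row_len := ((matrix.map List.length).max?).getD 0
  matrix.map (fun row => row ++ List.replicate (row_len - row.length) (0 : Int))

-- three loops, then pad; indices are in range on admitted inputs, so `.getD _ []` is exact
def add_right (matrix1 : List (List Int)) (matrix2 : List (List Int)) : List (List Int) :=
  let l1 := matrix1.length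
  let l2 := matrix2.length
  let temp :=
    ((List.range (min l1 l2)).map (fun row => matrix1.getD row [] ++ matrix2.getD row []))
    ++ ((List.range (l2 - l1)).map (fun row =>
          List.replicate (matrix1.getD 0 []).length (0 : Int) ++ matrix2.getD (l1 + row) []))
    ++ ((List.range (l1 - l2)).map (fun row =>
          matrix1.getD (l2 + row) [] ++ List.replicate (matrix2.getD 0 []).length (0 : Int)))
  pad temp

-- ===== PORT B =====
-- cell-wise construction: widths per index, then each output cell by index arithmetic
def add_right_alt (matrix1 : List (List Int)) (matrix2 : List (List Int)) : List (List Int) :=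
  let l1 := matrix1.length
  let l2 := matrix2.length
  let n := if l1 > l2 then l1 else l2
  let lw := (List.range n).map (fun i =>
    if i < l1 then (matrix1.getD i []).length else (matrix1.getD 0 []).length)
  let rw := (List.range n).map (fun i =>
    if i < l2 then (matrix2.getD i []).length else (matrix2.getD 0 []).length)
  let width := (((List.range n).map (fun i => lw.getD i 0 + rw.getD i 0)).max?).getD 0
  let cell := fun (i j : Nat) =>
    if j < lw.getD i 0 then (if i < l1 then (matrix1.getD i []).getD j 0 else 0)
    else if j < lw.getD i 0 + rw.getD i 0 then
      (if i < l2 then (matrix2.getD i []).getD (j - lw.getD i 0) 0 else 0)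
    else 0
  (List.range n).map (fun i => (List.range width).map (fun j => cell i j))

-- ===== PRECONDITION & SPEC =====
-- Pre_ excludes exactly the inputs where Python A raises: if either matrix is empty,
-- A hits matrix1[0]/matrix2[0] (IndexError) or max() of an empty list (ValueError).
def Pre_add_right (matrix1 : List (List Int)) (matrix2 : List (List Int)) : Prop :=
  matrix1 ≠ [] ∧ matrix2 ≠ []
instance (matrix1 : List (List Int)) (matrix2 : List (List Int)) : Decidable (Pre_add_right matrix1 matrix2) := by unfold Pre_add_right; infer_instance
def pvWitness_add_right : List (List Int) × List (List Int) := ([[1, 2], [3]], [[4], [5, 6], [7]])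

def Spec_add_right (matrix1 : List (List Int)) (matrix2 : List (List Int)) (out : List (List Int)) : Prop := out = add_right_alt matrix1 matrix2
instance (matrix1 : List (List Int)) (matrix2 : List (List Int)) (out : List (List Int)) : Decidable (Spec_add_right matrix1 matrix2 out) := by unfold Spec_add_right; infer_instance

-- ===== CLAIM =====
def Claim_equal_add_right : Prop := ∀ (matrix1 : List (List Int)) (matrix2 : List (List Int)), Dom_add_right matrix1 matrix2 → Pre_add_right matrix1 matrix2 → Spec_add_right matrix1 matrix2 (add_right matrix1 matrix2)

-- ===== LEMMAS AND PROOFS =====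

-- getD on a map over range picks out the function value
theorem getD_range_map {α : Type} (f : ℕ → α) (d : α) (n i : ℕ) (hi : i < n) :
    (((List.range n).map f).getD i d) = f i := by
  simp [List.getD, hi]

-- A's three loops produce exactly the indexed row list left(i) ++ right(i)
theorem rows_eq (matrix1 matrix2 : List (List Int)) :
    ((List.range (min matrix1.length matrix2.length)).map
        (fun row => matrix1.getD row [] ++ matrix2.getD row []))
    ++ ((List.range (matrix2.length - matrix1.length)).map (fun row =>
          List.replicate (matrix1.getD 0 []).length (0 : Int) ++ matrix2.getD (matrix1.length + row) []))
    ++ ((List.range (matrix1.length - matrix2.length)).map (fun row =>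
          matrix1.getD (matrix2.length + row) [] ++ List.replicate (matrix2.getD 0 []).length (0 : Int)))
    = (List.range (if matrix1.length > matrix2.length then matrix1.length else matrix2.length)).map
        (fun i =>
        (if i < matrix1.length then matrix1.getD i []
         else List.replicate (matrix1.getD 0 []).length (0 : Int))
        ++ (if i < matrix2.length then matrix2.getD i []
            else List.replicate (matrix2.getD 0 []).length (0 : Int))) := by
  rcases Nat.le_total matrix1.length matrix2.length with h | h
  · have hmin : min matrix1.length matrix2.length = matrix1.length := Nat.min_eq_left h
    have hmax : (if matrix1.length > matrix2.length then matrix1.length else matrix2.length)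
        = matrix1.length + (matrix2.length - matrix1.length) := by
      split <;> omega
    have h3 : matrix1.length - matrix2.length = 0 := by omega
    rw [hmin, hmax, h3, List.range_add, List.map_append]
    simp only [List.range_zero, List.map_nil, List.append_nil, List.map_map]
    congr 1
    · apply List.map_congr_left
      intro i hi
      rw [List.mem_range] at hi
      rw [if_pos hi, if_pos (by omega)]
    · apply List.map_congr_left
      intro r hr
      rw [List.mem_range] at hr
      simp only [Function.comp_apply]
      rw [if_neg (by omega), if_pos (by omega)]
  · have hmin : min matrix1.length matrix2.length = matrix2.length := Nat.min_eq_right h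
    have hmax : (if matrix1.length > matrix2.length then matrix1.length else matrix2.length)
        = matrix2.length + (matrix1.length - matrix2.length) := by
      split <;> omega
    have h2 : matrix2.length - matrix1.length = 0 := by omega
    rw [hmin, hmax, h2, List.range_add, List.map_append]
    simp only [List.range_zero, List.map_nil, List.append_nil, List.map_map]
    congr 1
    · apply List.map_congr_left
      intro i hi
      rw [List.mem_range] at hi
      rw [if_pos (by omega), if_pos hi]
    · apply List.map_congr_left
      intro r hr
      rw [List.mem_range] at hr
      simp only [Function.comp_apply]
      rw [if_pos (by omega), if_neg (by omega)]

-- padding a list to width W is the same as reading it cell-by-cell with default 0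
theorem pad_row_eq (L : List Int) (W : ℕ) (h : L.length ≤ W) :
    L ++ List.replicate (W - L.length) (0 : Int)
      = (List.range W).map (fun j => L.getD j 0) := by
  apply List.ext_getElem
  · simp; omega
  · intro j h1 h2
    simp only [List.getElem_map, List.getElem_range]
    by_cases hj : j < L.length
    · rw [List.getElem_append_left hj, List.getD_eq_getElem _ _ hj]
    · rw [List.getElem_append_right (by omega)]
      simp [Nat.le_of_not_lt hj]

-- getD of an append splits on the left length
theorem getD_append_split (a b : List Int) (j : ℕ) :
    (a ++ b).getD j 0 = if j < a.length then a.getD j 0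
      else if j < a.length + b.length then b.getD (j - a.length) 0 else 0 := by
  by_cases hj : j < a.length
  · rw [if_pos hj, List.getD_eq_getElem _ _ (by simp; omega),
        List.getElem_append_left hj, List.getD_eq_getElem _ _ hj]
  · rw [if_neg hj]
    by_cases hj2 : j < a.length + b.length
    · rw [if_pos hj2, List.getD_eq_getElem _ _ (by simp; omega),
          List.getElem_append_right (by omega), List.getD_eq_getElem _ _ (by omega)]
    · rw [if_neg hj2, List.getD_eq_default _ _ (by simp; omega)]

-- pad over an indexed family of concatenated rows = cell-wise indexed construction
theorem pad_map_eq (lf rf : ℕ → List Int) (n : ℕ) :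
    pad ((List.range n).map (fun i => lf i ++ rf i))
    = (List.range n).map (fun i =>
        (List.range ((((List.range n).map
            (fun i => (lf i).length + (rf i).length)).max?).getD 0)).map
          (fun j => if j < (lf i).length then (lf i).getD j 0
                    else if j < (lf i).length + (rf i).length
                      then (rf i).getD (j - (lf i).length) 0
                    else 0)) := by
  unfold pad
  simp only [List.map_map, Function.comp_def, List.length_append]
  apply List.map_congr_left
  intro i hi
  rw [List.mem_range] at hi
  have hle : (lf i).length + (rf i).length
      ≤ (((List.range n).map (fun i => (lf i).length + (rf i).length)).max?).getD 0 := by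
    apply List.le_max?_getD_of_mem
    exact List.mem_map_of_mem (List.mem_range.mpr hi)
  have := pad_row_eq (lf i ++ rf i) _ (by simp only [List.length_append]; exact hle)
  simp only [List.length_append] at this
  rw [this]
  apply List.map_congr_left
  intro j _
  rw [getD_append_split]

-- B's port computes exactly the cell-wise form that pad_map_eq produces
theorem alt_eq (matrix1 matrix2 : List (List Int)) :
    add_right_alt matrix1 matrix2
    = (List.range (if matrix1.length > matrix2.length then matrix1.length else matrix2.length)).map
        (fun i =>
        (List.range ((((List.range (if matrix1.length > matrix2.length then matrix1.length else matrix2.length)).map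
            (fun i =>
              ((if i < matrix1.length then matrix1.getD i []
                else List.replicate (matrix1.getD 0 []).length (0 : Int))).length
            + ((if i < matrix2.length then matrix2.getD i []
                else List.replicate (matrix2.getD 0 []).length (0 : Int))).length)).max?).getD 0)).map
          (fun j =>
            if j < ((if i < matrix1.length then matrix1.getD i []
                     else List.replicate (matrix1.getD 0 []).length (0 : Int))).length then
              ((if i < matrix1.length then matrix1.getD i []
                else List.replicate (matrix1.getD 0 []).length (0 : Int))).getD j 0
            else if j < ((if i < matrix1.length then matrix1.getD i []
                          else List.replicate (matrix1.getD 0 []).length (0 : Int))).length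
                      + ((if i < matrix2.length then matrix2.getD i []
                          else List.replicate (matrix2.getD 0 []).length (0 : Int))).length then
              ((if i < matrix2.length then matrix2.getD i []
                else List.replicate (matrix2.getD 0 []).length (0 : Int))).getD
                (j - ((if i < matrix1.length then matrix1.getD i []
                       else List.replicate (matrix1.getD 0 []).length (0 : Int))).length) 0
            else 0)) := by
  unfold add_right_alt
  simp only []
  set n := (if matrix1.length > matrix2.length then matrix1.length else matrix2.length) with hn
  have hlw : ∀ i, i < n →
      ((List.range n).map (fun i =>
        if i < matrix1.length then (matrix1.getD i []).length
        else (matrix1.getD 0 []).length)).getD i 0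
      = ((if i < matrix1.length then matrix1.getD i []
          else List.replicate (matrix1.getD 0 []).length (0 : Int))).length := by
    intro i hi
    rw [getD_range_map _ _ _ _ hi]
    by_cases h : i < matrix1.length <;> simp [h]
  have hrw : ∀ i, i < n →
      ((List.range n).map (fun i =>
        if i < matrix2.length then (matrix2.getD i []).length
        else (matrix2.getD 0 []).length)).getD i 0
      = ((if i < matrix2.length then matrix2.getD i []
          else List.replicate (matrix2.getD 0 []).length (0 : Int))).length := by
    intro i hi
    rw [getD_range_map _ _ _ _ hi]
    by_cases h : i < matrix2.length <;> simp [h]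
  have hwidth :
      (List.range n).map (fun i =>
        ((List.range n).map (fun i =>
          if i < matrix1.length then (matrix1.getD i []).length
          else (matrix1.getD 0 []).length)).getD i 0
        + ((List.range n).map (fun i =>
          if i < matrix2.length then (matrix2.getD i []).length
          else (matrix2.getD 0 []).length)).getD i 0)
      = (List.range n).map (fun i =>
          ((if i < matrix1.length then matrix1.getD i []
            else List.replicate (matrix1.getD 0 []).length (0 : Int))).length
        + ((if i < matrix2.length then matrix2.getD i []
            else List.replicate (matrix2.getD 0 []).length (0 : Int))).length) := by
    apply List.map_congr_left
    intro i hi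
    rw [List.mem_range] at hi
    rw [hlw i hi, hrw i hi]
  rw [hwidth]
  apply List.map_congr_left
  intro i hi
  rw [List.mem_range] at hi
  apply List.map_congr_left
  intro j _
  rw [hlw i hi, hrw i hi]
  by_cases h1 : i < matrix1.length
  · by_cases h2 : i < matrix2.length <;> simp [h1, h2]
  · by_cases h2 : i < matrix2.length
    · simp only [h1, if_false, h2, if_true, List.length_replicate]
      split
      · rename_i hj
        rw [List.getD_eq_getElem _ _ (by simpa using hj), List.getElem_replicate]
      · rfl
    · simp only [h1, h2, if_false, List.length_replicate]
      split
      · rename_i hj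
        rw [List.getD_eq_getElem _ _ (by simpa using hj), List.getElem_replicate]
      · rename_i hj1
        split
        · rename_i hj2
          rw [List.getD_eq_getElem _ _ (by simp only [List.length_replicate]; omega), List.getElem_replicate]
        · rfl

-- ===== VERDICT =====
theorem add_right_spec : Claim_equal_add_right := by
  intro matrix1 matrix2 _ _
  unfold Spec_add_right add_right
  simp only []
  rw [rows_eq, pad_map_eq, alt_eq]
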